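-- pv_equiv track=rewrite | github.com/luismelgar-30/tienda_isi | test/test_capacitacion.py | validate_text_field
-- ===== SOURCE A (Python) =====
-- def validate_text_field(text):
--     if len(text) < 3 or len(text) > 20:
--         return False, "El campo debe tener entre 3 y 20 caracteres."
--     if any(char.isdigit() for char in text):
--         return False, "El campo no puede contener números."
--     if not all(char.isalnum() or char.isspace() for char in text):
--         return False, "El campo no puede contener caracteres especiales."
--     return True, ""
-- ===== SOURCE B (Python) =====
-- def validate_text_field(text):
--     if len(text) < 3 or len(text) > 20:
--         return False, "El campo debe tener entre 3 y 20 caracteres."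
--     worst = 0
--     for ch in text:
--         if ch.isdigit():
--             sev = 2
--         elif not (ch.isalnum() or ch.isspace()):
--             sev = 1
--         else:
--             sev = 0
--         if sev > worst:
--             worst = sev
--     if worst == 2:
--         return False, "El campo no puede contener números."
--     if worst == 1:
--         return False, "El campo no puede contener caracteres especiales."
--     return True, ""
-- ===== Notes on version B (the rewrite author's own statement) =====
-- stated objective: alternative
-- what changed: B maps every character to a numeric severity (2=digit, 1=special, 0=ok), reduces the text by a single max fold, and decodes the worst severity into the message, instead of A's staged any/all scans; correct because a digit is alnum (never 'special'), so max severity 2 iff some digit and 1 iff no digit but some special, matching A's message priority.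
import Mathlib
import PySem

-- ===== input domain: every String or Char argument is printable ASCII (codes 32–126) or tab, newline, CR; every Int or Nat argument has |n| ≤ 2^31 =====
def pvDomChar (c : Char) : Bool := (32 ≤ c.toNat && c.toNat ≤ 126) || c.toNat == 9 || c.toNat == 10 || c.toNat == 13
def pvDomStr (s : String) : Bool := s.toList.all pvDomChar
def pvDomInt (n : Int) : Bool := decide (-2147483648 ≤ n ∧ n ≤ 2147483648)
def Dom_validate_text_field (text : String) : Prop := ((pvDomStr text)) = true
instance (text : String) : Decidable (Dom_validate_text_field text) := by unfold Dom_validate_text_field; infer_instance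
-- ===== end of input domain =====

-- B replaces A's staged any/all scans by a single max-fold over per-character severities (2=digit,1=special,0=ok) decoded into the message (alternative decomposition, same cost).


-- ===== PORT A =====
def validate_text_field (text : String) : Bool × String :=
  if PySem.Str.len text < 3 || PySem.Str.len text > 20 then
    (false, "El campo debe tener entre 3 y 20 caracteres.")
  else if text.toList.any (fun c => PySem.Chars.isdigit c) then
    (false, "El campo no puede contener números.")
  else if !(text.toList.all (fun c => PySem.Chars.isalnum c || PySem.Chars.isspace c)) then
    (false, "El campo no puede contener caracteres especiales.")
  else (true, "")

-- ===== PORT B =====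
-- per-character severity: 2 = digit, 1 = special, 0 = ok
def pvSev (c : Char) : Nat :=
  if PySem.Chars.isdigit c then 2
  else if !(PySem.Chars.isalnum c || PySem.Chars.isspace c) then 1
  else 0

def validate_text_field_alt (text : String) : Bool × String :=
  if PySem.Str.len text < 3 || PySem.Str.len text > 20 then
    (false, "El campo debe tener entre 3 y 20 caracteres.")
  else
    let worst := text.toList.foldl (fun w c => if pvSev c > w then pvSev c else w) 0
    if worst = 2 then (false, "El campo no puede contener números.")
    else if worst = 1 then (false, "El campo no puede contener caracteres especiales.")
    else (true, "")

-- ===== PRECONDITION & SPEC =====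
def Spec_validate_text_field (text : String) (out : Bool × String) : Prop := out = validate_text_field_alt text
instance (text : String) (out : Bool × String) : Decidable (Spec_validate_text_field text out) := by unfold Spec_validate_text_field; infer_instance

-- ===== CLAIM (what is proved, stated in full; the proofs are below) =====
def Claim_equal_validate_text_field : Prop := ∀ (text : String), Dom_validate_text_field text → Spec_validate_text_field text (validate_text_field text)

-- ===== LEMMAS AND PROOFS =====

-- the conditional severity of the whole list, matching A's message priority
def pvWorst (l : List Char) : Nat :=
  if l.any (fun c => PySem.Chars.isdigit c) then 2
  else if l.any (fun c => !(PySem.Chars.isalnum c || PySem.Chars.isspace c)) then 1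
  else 0

theorem pv_worst_foldl (l : List Char) (w : Nat) :
    l.foldl (fun w c => if pvSev c > w then pvSev c else w) w = max w (pvWorst l) := by
  induction l generalizing w with
  | nil => simp [pvWorst]
  | cons c cs ih =>
      rw [List.foldl_cons, ih]
      rcases Bool.eq_false_or_eq_true (PySem.Chars.isdigit c) with hd | hd <;>
        rcases Bool.eq_false_or_eq_true (PySem.Chars.isalnum c || PySem.Chars.isspace c) with hs | hs <;>
          rcases Bool.eq_false_or_eq_true (cs.any (fun x => PySem.Chars.isdigit x)) with h1 | h1 <;>
            rcases Bool.eq_false_or_eq_true (cs.any (fun x => !(PySem.Chars.isalnum x || PySem.Chars.isspace x))) with h2 | h2 <;>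
              simp only [pvWorst, pvSev, List.any_cons, hd, hs, h1, h2, Bool.true_or, Bool.false_or, Bool.or_true, Bool.or_false, Bool.not_true, Bool.not_false, reduceIte] <;> split_ifs <;> omega

-- ===== VERDICT (by name: the statement is the Claim_ definition above) =====
theorem validate_text_field_spec : Claim_equal_validate_text_field := by
  intro text _
  unfold Spec_validate_text_field validate_text_field validate_text_field_alt
  rw [pv_worst_foldl]
  simp only [Nat.zero_max, pvWorst, List.all_eq_not_any_not, Bool.not_not]
  split_ifs <;> simp_all
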